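-- pv_equiv track=rewrite | github.com/pp221B050642/python2 | numpy/secret_agent.py | next_letter
-- ===== SOURCE A (Python) =====
-- def next_letter(s):
--     t = ''
--     for i in s:
--         if ord(i)>=97 and ord(i)<122:
--             i = chr(ord(i)+1)
--         elif ord(i) == 122:
--             i = 'a'
--         t += i
--     return t
-- ===== SOURCE B (Python) =====
-- _TABLE = str.maketrans('abcdefghijklmnopqrstuvwxyz', 'bcdefghijklmnopqrstuvwxyza')
--
-- def next_letter(s):
--     return s.translate(_TABLE)
-- ===== Notes on version B (the rewrite author's own statement) =====
-- stated objective: idiomatic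
-- what changed: Replaced the per-character if/elif loop with repeated string concatenation by a fixed str.maketrans translation table applied in a single s.translate call.
import Mathlib
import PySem

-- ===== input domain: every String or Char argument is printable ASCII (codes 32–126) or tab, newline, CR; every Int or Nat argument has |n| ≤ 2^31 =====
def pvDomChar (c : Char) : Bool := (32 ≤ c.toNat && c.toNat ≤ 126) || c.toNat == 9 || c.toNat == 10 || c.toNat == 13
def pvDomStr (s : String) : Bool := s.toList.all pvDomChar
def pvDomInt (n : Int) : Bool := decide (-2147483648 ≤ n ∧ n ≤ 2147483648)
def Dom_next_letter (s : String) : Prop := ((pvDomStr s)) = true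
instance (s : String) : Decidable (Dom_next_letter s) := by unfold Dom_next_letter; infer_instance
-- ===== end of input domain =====

-- B replaces A's per-character if/elif loop with a translation table built once and a single lookup pass (idiomatic; return value only).

-- ===== PORT A =====
-- the body of A's loop: reassign i, then append
def pvStepA (c : Char) : Char :=
  if 97 ≤ c.toNat ∧ c.toNat < 122 then Char.ofNat (c.toNat + 1)
  else if c.toNat = 122 then 'a' else c

def next_letter (s : String) : String :=
  String.mk (s.toList.foldl (fun t i => t ++ [pvStepA i]) [])

-- ===== PORT B =====
-- str.maketrans('abcdefghijklmnopqrstuvwxyz', 'bcdefghijklmnopqrstuvwxyza')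
def pvTable : PySem.Dict Char Char :=
  PySem.Dict.ofList (List.zip "abcdefghijklmnopqrstuvwxyz".toList "bcdefghijklmnopqrstuvwxyza".toList)

-- s.translate(table): each char mapped through the table, unmapped chars pass through
def next_letter_alt (s : String) : String :=
  String.mk (s.toList.map (fun c => (pvTable.get? c).getD c))

-- ===== PRECONDITION & SPEC =====
def Spec_next_letter (s : String) (out : String) : Prop := out = next_letter_alt s
instance (s : String) (out : String) : Decidable (Spec_next_letter s out) := by unfold Spec_next_letter; infer_instance

-- ===== CLAIM (what is proved, stated in full; the proofs are below) =====
def Claim_equal_next_letter : Prop := ∀ (s : String), Dom_next_letter s → Spec_next_letter s (next_letter s)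

-- ===== LEMMAS AND PROOFS =====

set_option maxRecDepth 8192 in
theorem pvStep_eq_table_range :
    ∀ n ∈ List.range 127, pvStepA (Char.ofNat n) = ((pvTable.get? (Char.ofNat n)).getD (Char.ofNat n)) := by
  decide

theorem pvStep_eq_table (c : Char) (h : pvDomChar c = true) :
    pvStepA c = (pvTable.get? c).getD c := by
  have hc : c.toNat < 127 := by
    simp [pvDomChar] at h
    omega
  have := pvStep_eq_table_range c.toNat (List.mem_range.mpr hc)
  rwa [Char.ofNat_toNat] at this

-- ===== VERDICT (by name: the statement is the Claim_ definition above) =====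
theorem next_letter_spec : Claim_equal_next_letter := by
  intro s hdom
  unfold Spec_next_letter next_letter next_letter_alt
  rw [PySem.List.foldl_append_singleton_eq_map, List.nil_append]
  congr 1
  apply List.map_congr_left
  intro c hc
  exact pvStep_eq_table c (List.all_eq_true.mp hdom c hc)
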